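-- pv_equiv track=rewrite | github.com/apaolillo/adventofcode | 2021/day23/day23b.py | find_path_from_room
-- ===== SOURCE A (Python) =====
-- n2i = {
--     'corridor': 0,
--     'roomA': 1,
--     'roomB': 2,
--     'roomC': 3,
--     'roomD': 4,
-- }
--
-- room_cor_pos = {'A': 2, 'B': 4, 'C': 6, 'D': 8}
--
-- energy = {
--     'A': 1,
--     'B': 10,
--     'C': 100,
--     'D': 1000,
-- }
--
-- def copy_state(state):
--     return [tuple(state[i]) for i in range(len(state))]
--
-- def find_path_from_room(room_type, room_name, target_corridor_pos, state, pod, changed_room, initial_steps):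
--     path_exist = True
--     current_corridor = state[n2i['corridor']]
--     corridor_pos = room_cor_pos[room_type]
--     steps = initial_steps
--     if current_corridor[corridor_pos]:
--         path_exist = False
--     while path_exist and corridor_pos != target_corridor_pos:
--         corridor_pos += 1 if target_corridor_pos > corridor_pos else -1
--         steps += 1
--         if current_corridor[corridor_pos]:
--             path_exist = False
--
--     cost = 0
--     new_state = None
--     if path_exist:
--         lcor = list(current_corridor)
--         lcor[target_corridor_pos] = pod
--         new_corridor = tuple(lcor)
--         new_state = copy_state(state)
--         new_state[n2i['corridor']] = new_corridor
--         new_state[n2i[room_name]] = changed_room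
--         cost = steps * energy[pod]
--
--     return path_exist, cost, new_state
-- ===== SOURCE B (Python) =====
-- n2i = {
--     'corridor': 0,
--     'roomA': 1,
--     'roomB': 2,
--     'roomC': 3,
--     'roomD': 4,
-- }
--
-- room_cor_pos = {'A': 2, 'B': 4, 'C': 6, 'D': 8}
--
-- energy = {
--     'A': 1,
--     'B': 10,
--     'C': 100,
--     'D': 1000,
-- }
--
-- def find_path_from_room(room_type, room_name, target_corridor_pos, state, pod, changed_room, initial_steps):
--     # Instead of walking the path cell by cell, compute once the contiguous clear
--     # interval of the corridor around the room mouth (nearest occupied cell on each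
--     # side), then decide reachability by an O(1) interval-membership test.
--     corridor = state[0]
--     start = room_cor_pos[room_type]
--     occupied = [i for i, c in enumerate(corridor) if c]
--     left = max((i for i in occupied if i <= start), default=-1)
--     right = min((i for i in occupied if i >= start), default=len(corridor))
--     if not (left < start < right and left < target_corridor_pos < right):
--         return False, 0, None
--     new_corridor = list(corridor)
--     new_corridor[target_corridor_pos] = pod
--     new_state = [tuple(row) for row in state]
--     new_state[0] = tuple(new_corridor)
--     new_state[n2i[room_name]] = changed_room
--     steps = initial_steps + abs(target_corridor_pos - start)
--     return True, steps * energy[pod], new_state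
-- ===== Notes on version B (the rewrite author's own statement) =====
-- stated objective: alternative
-- what changed: A walks the corridor cell by cell toward the target, mutating a position cursor and step counter and testing each stepped-to cell; B instead collects the occupied corridor positions once, derives the contiguous clear interval around the room mouth (nearest blocker on each side), decides reachability by an interval-membership test, and computes the step count in closed form.
-- intended difference: On a negative target_corridor_pos with the walked path clear, A returns success and writes the pod through Python's negative-index wraparound; B returns (False, 0, None), the intended result, since negative corridor positions do not exist. — e.g. on find_path_from_room("A", "roomA", -1, [[none, none, none], [some "A"]], "A", [], 0): A returns (true, 3, some [[none, none, some "A"], []]), B returns (false, 0, none)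
import Mathlib
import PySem

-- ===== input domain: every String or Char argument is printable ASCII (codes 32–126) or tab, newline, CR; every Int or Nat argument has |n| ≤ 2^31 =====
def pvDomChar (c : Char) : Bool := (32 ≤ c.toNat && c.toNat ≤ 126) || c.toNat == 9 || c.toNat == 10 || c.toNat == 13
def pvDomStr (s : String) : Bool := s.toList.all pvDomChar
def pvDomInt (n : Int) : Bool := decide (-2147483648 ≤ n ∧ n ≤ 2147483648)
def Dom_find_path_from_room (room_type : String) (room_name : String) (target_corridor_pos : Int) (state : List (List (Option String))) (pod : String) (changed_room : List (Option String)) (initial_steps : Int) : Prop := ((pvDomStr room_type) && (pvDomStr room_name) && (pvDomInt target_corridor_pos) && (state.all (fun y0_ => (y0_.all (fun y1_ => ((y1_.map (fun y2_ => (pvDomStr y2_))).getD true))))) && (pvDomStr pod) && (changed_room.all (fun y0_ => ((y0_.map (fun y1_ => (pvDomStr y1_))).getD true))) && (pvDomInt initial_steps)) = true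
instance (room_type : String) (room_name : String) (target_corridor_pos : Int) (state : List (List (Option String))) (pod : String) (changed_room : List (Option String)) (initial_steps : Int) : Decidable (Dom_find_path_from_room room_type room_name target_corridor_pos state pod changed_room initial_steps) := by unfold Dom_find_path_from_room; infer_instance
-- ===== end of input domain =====

-- B replaces A's cell-by-cell walk toward the target by a different characterisation: it
-- computes the corridor's occupied positions once, derives the contiguous clear interval
-- around the room mouth (nearest blocker on each side), and decides reachability by an
-- interval-membership test; on negative targets (nonexistent positions) B reports no path
-- where A relies on negative-index wraparound — stated as the intended difference D_ below.

-- Shared module constants of Source A/Source B (`room_cor_pos`, `energy`, `n2i` dict lookups, ported as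
-- if-chains; Pre_ excludes keys outside the dicts, where Python raises KeyError), and Python
-- truthiness of a corridor cell: None and '' are falsy.  `truthyAt` is False out of range; both
-- Pythons would raise IndexError there and Pre_ keeps every index actually inspected in range.
def truthyAt (cor : List (Option String)) (p : Int) : Bool :=
  match PySem.List.pyGet? cor p with
  | some (some s) => s ≠ ""
  | _ => false

def roomCorPos (rt : String) : Int :=
  if rt = "A" then 2 else if rt = "B" then 4 else if rt = "C" then 6 else if rt = "D" then 8 else 0

def energyOf (p : String) : Int :=
  if p = "A" then 1 else if p = "B" then 10 else if p = "C" then 100 else 1000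

def n2iIdx (rn : String) : Int :=
  if rn = "corridor" then 0 else if rn = "roomA" then 1
  else if rn = "roomB" then 2 else if rn = "roomC" then 3 else 4

-- ===== PORT A =====
-- A's while loop: move corridor_pos one cell toward target, count a step, stop on a truthy
-- cell.  The loop runs exactly |target - pos| iterations (pos moves one cell toward target each
-- time), so that count is used as structural fuel; the guard `pos = target` is fuel = 0.
def walkAGo (cor : List (Option String)) (target : Int) : Nat → Int → Int → Bool × Int
  | 0, _, steps => (true, steps)
  | fuel + 1, pos, steps =>
    if truthyAt cor (pos + (if target > pos then 1 else -1)) then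
      (false, steps + 1)
    else walkAGo cor target fuel (pos + (if target > pos then 1 else -1)) (steps + 1)

def walkA (cor : List (Option String)) (target pos steps : Int) : Bool × Int :=
  walkAGo cor target (target - pos).natAbs pos steps

-- copy_state(state): [tuple(state[i]) for i in range(len(state))] — identity under the List convention.
def copyState (state : List (List (Option String))) : List (List (Option String)) :=
  state.map (fun r => r)

def find_path_from_room (room_type : String) (room_name : String) (target_corridor_pos : Int) (state : List (List (Option String))) (pod : String) (changed_room : List (Option String)) (initial_steps : Int) : Bool × Int × Option (List (List (Option String))) :=
  -- state[n2i['corridor']]; Pre_ excludes state = [] (Python IndexError)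
  let current_corridor := (PySem.List.pyGet? state 0).getD []
  let corridor_pos := roomCorPos room_type
  if truthyAt current_corridor corridor_pos then (false, 0, none)
  else
    let r := walkA current_corridor target_corridor_pos corridor_pos initial_steps
    if r.1 then
      let new_corridor := PySem.List.pySetD current_corridor target_corridor_pos (some pod)
      let ns := PySem.List.pySetD (copyState state) 0 new_corridor
      let ns2 := PySem.List.pySetD ns (n2iIdx room_name) changed_room
      (true, r.2 * energyOf pod, some ns2)
    else (false, 0, none)

-- ===== PORT B =====
-- [i for i, c in enumerate(corridor) if c]: the occupied corridor positions.
def occB (cor : List (Option String)) : List Int :=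
  ((PySem.List.enumerate cor).filter (fun p =>
    match p.2 with | some s => s ≠ "" | none => false)).map (fun p => p.1)

-- max(…, default=-1) / min(…, default=len(corridor)): nearest occupied cell on each side
def leftB (cor : List (Option String)) (start : Int) : Int :=
  (PySem.List.max? ((occB cor).filter (fun i => i ≤ start)) (fun i => i)).getD (-1)

def rightB (cor : List (Option String)) (start : Int) : Int :=
  (PySem.List.min? ((occB cor).filter (fun i => start ≤ i)) (fun i => i)).getD (cor.length : Int)

def find_path_from_room_alt (room_type : String) (room_name : String) (target_corridor_pos : Int) (state : List (List (Option String))) (pod : String) (changed_room : List (Option String)) (initial_steps : Int) : Bool × Int × Option (List (List (Option String))) :=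
  let corridor := (PySem.List.pyGet? state 0).getD []
  let start := roomCorPos room_type
  let left := leftB corridor start
  let right := rightB corridor start
  if left < start ∧ start < right ∧ left < target_corridor_pos ∧ target_corridor_pos < right then
    let new_corridor := PySem.List.pySetD corridor target_corridor_pos (some pod)
    let ns := PySem.List.pySetD (state.map (fun r => r)) 0 new_corridor
    let ns2 := PySem.List.pySetD ns (n2iIdx room_name) changed_room
    (true, (initial_steps + ((target_corridor_pos - start).natAbs : Int)) * energyOf pod, some ns2)
  else (false, 0, none)

-- ===== PRECONDITION & SPEC =====
-- a truthy corridor cell somewhere in the inclusive segment between s and t, clipped to the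
-- valid (wrap-around) index range of the corridor
def blockedBetween (cor : List (Option String)) (s t : Int) : Bool :=
  (PySem.List.pyRange (max (min s t) (-(cor.length : Int)))
      (min (max s t) ((cor.length : Int) - 1) + 1) 1).any (fun p => truthyAt cor p)

-- Pre_ excludes exactly the inputs on which A raises: room_type outside room_cor_pos, empty
-- state, room mouth past the corridor end, and — when the path is clear so that the move is
-- actually made — a target outside the corridor's (wrap-around) index range, a pod outside
-- energy, a room_name outside n2i, or its row index past len(state).
def Pre_find_path_from_room (room_type : String) (room_name : String) (target_corridor_pos : Int) (state : List (List (Option String))) (pod : String) (changed_room : List (Option String)) (initial_steps : Int) : Prop :=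
  (room_type = "A" ∨ room_type = "B" ∨ room_type = "C" ∨ room_type = "D") ∧
  state ≠ [] ∧
  roomCorPos room_type < ((state.headD []).length : Int) ∧
  (¬ blockedBetween (state.headD []) (roomCorPos room_type) target_corridor_pos = true →
    -((state.headD []).length : Int) ≤ target_corridor_pos ∧
    target_corridor_pos < ((state.headD []).length : Int) ∧
    (pod = "A" ∨ pod = "B" ∨ pod = "C" ∨ pod = "D") ∧
    (room_name = "corridor" ∨ room_name = "roomA" ∨ room_name = "roomB" ∨
     room_name = "roomC" ∨ room_name = "roomD") ∧
    n2iIdx room_name < (state.length : Int))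

instance (room_type : String) (room_name : String) (target_corridor_pos : Int) (state : List (List (Option String))) (pod : String) (changed_room : List (Option String)) (initial_steps : Int) : Decidable (Pre_find_path_from_room room_type room_name target_corridor_pos state pod changed_room initial_steps) := by unfold Pre_find_path_from_room; infer_instance

def pvWitness_find_path_from_room : String × String × Int × List (List (Option String)) × String × List (Option String) × Int :=
  ("A", "roomA", 0,
   [[none, none, none, none, none, none, none, none, none, none, none], []],
   "A", [], 1)

-- On a negative target position with the (wrap-around) path clear, A returns success and writes
-- the pod through Python's negative-index wraparound; B returns (False, 0, None), the intended
-- result, since negative corridor positions do not exist.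
def D_find_path_from_room (room_type : String) (room_name : String) (target_corridor_pos : Int) (state : List (List (Option String))) (pod : String) (changed_room : List (Option String)) (initial_steps : Int) : Prop :=
  target_corridor_pos < 0 ∧
  ¬ blockedBetween (state.headD []) (roomCorPos room_type) target_corridor_pos = true

instance (room_type : String) (room_name : String) (target_corridor_pos : Int) (state : List (List (Option String))) (pod : String) (changed_room : List (Option String)) (initial_steps : Int) : Decidable (D_find_path_from_room room_type room_name target_corridor_pos state pod changed_room initial_steps) := by unfold D_find_path_from_room; infer_instance

def Spec_find_path_from_room (room_type : String) (room_name : String) (target_corridor_pos : Int) (state : List (List (Option String))) (pod : String) (changed_room : List (Option String)) (initial_steps : Int) (out : Bool × Int × Option (List (List (Option String)))) : Prop := ¬ D_find_path_from_room room_type room_name target_corridor_pos state pod changed_room initial_steps → out = find_path_from_room_alt room_type room_name target_corridor_pos state pod changed_room initial_steps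
instance (room_type : String) (room_name : String) (target_corridor_pos : Int) (state : List (List (Option String))) (pod : String) (changed_room : List (Option String)) (initial_steps : Int) (out : Bool × Int × Option (List (List (Option String)))) : Decidable (Spec_find_path_from_room room_type room_name target_corridor_pos state pod changed_room initial_steps out) := by unfold Spec_find_path_from_room; infer_instance

def pvDiffWitness_find_path_from_room : String × String × Int × List (List (Option String)) × String × List (Option String) × Int :=
  ("A", "roomA", -1, [[none, none, none], [some "A"]], "A", [], 0)

def pvDiffWitnessOut_find_path_from_room : (Bool × Int × Option (List (List (Option String)))) × (Bool × Int × Option (List (List (Option String)))) :=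
  ((true, 3, some [[none, none, some "A"], []]), (false, 0, none))

-- ===== CLAIM (what is proved, stated in full; the proofs are below) =====
def Claim_unchanged_find_path_from_room : Prop := ∀ (room_type : String) (room_name : String) (target_corridor_pos : Int) (state : List (List (Option String))) (pod : String) (changed_room : List (Option String)) (initial_steps : Int), Dom_find_path_from_room room_type room_name target_corridor_pos state pod changed_room initial_steps → Pre_find_path_from_room room_type room_name target_corridor_pos state pod changed_room initial_steps → Spec_find_path_from_room room_type room_name target_corridor_pos state pod changed_room initial_steps (find_path_from_room room_type room_name target_corridor_pos state pod changed_room initial_steps)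
def Claim_changed_find_path_from_room : Prop := Dom_find_path_from_room (pvDiffWitness_find_path_from_room.1) (pvDiffWitness_find_path_from_room.2.1) (pvDiffWitness_find_path_from_room.2.2.1) (pvDiffWitness_find_path_from_room.2.2.2.1) (pvDiffWitness_find_path_from_room.2.2.2.2.1) (pvDiffWitness_find_path_from_room.2.2.2.2.2.1) (pvDiffWitness_find_path_from_room.2.2.2.2.2.2) ∧ Pre_find_path_from_room (pvDiffWitness_find_path_from_room.1) (pvDiffWitness_find_path_from_room.2.1) (pvDiffWitness_find_path_from_room.2.2.1) (pvDiffWitness_find_path_from_room.2.2.2.1) (pvDiffWitness_find_path_from_room.2.2.2.2.1) (pvDiffWitness_find_path_from_room.2.2.2.2.2.1) (pvDiffWitness_find_path_from_room.2.2.2.2.2.2) ∧ D_find_path_from_room (pvDiffWitness_find_path_from_room.1) (pvDiffWitness_find_path_from_room.2.1) (pvDiffWitness_find_path_from_room.2.2.1) (pvDiffWitness_find_path_from_room.2.2.2.1) (pvDiffWitness_find_path_from_room.2.2.2.2.1) (pvDiffWitness_find_path_from_room.2.2.2.2.2.1) (pvDiffWitness_find_path_from_room.2.2.2.2.2.2)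 ∧ find_path_from_room (pvDiffWitness_find_path_from_room.1) (pvDiffWitness_find_path_from_room.2.1) (pvDiffWitness_find_path_from_room.2.2.1) (pvDiffWitness_find_path_from_room.2.2.2.1) (pvDiffWitness_find_path_from_room.2.2.2.2.1) (pvDiffWitness_find_path_from_room.2.2.2.2.2.1) (pvDiffWitness_find_path_from_room.2.2.2.2.2.2) = pvDiffWitnessOut_find_path_from_room.1 ∧ find_path_from_room_alt (pvDiffWitness_find_path_from_room.1) (pvDiffWitness_find_path_from_room.2.1) (pvDiffWitness_find_path_from_room.2.2.1) (pvDiffWitness_find_path_from_room.2.2.2.1) (pvDiffWitness_find_path_from_room.2.2.2.2.1) (pvDiffWitness_find_path_from_room.2.2.2.2.2.1) (pvDiffWitness_find_path_from_room.2.2.2.2.2.2) = pvDiffWitnessOut_find_path_from_room.2 ∧ pvDiffWitnessOut_find_path_from_room.1 ≠ pvDiffWitnessOut_find_path_from_room.2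
def Claim_exact_find_path_from_room : Prop := ∀ (room_type : String) (room_name : String) (target_corridor_pos : Int) (state : List (List (Option String))) (pod : String) (changed_room : List (Option String)) (initial_steps : Int), Dom_find_path_from_room room_type room_name target_corridor_pos state pod changed_room initial_steps → Pre_find_path_from_room room_type room_name target_corridor_pos state pod changed_room initial_steps → D_find_path_from_room room_type room_name target_corridor_pos state pod changed_room initial_steps → find_path_from_room room_type room_name target_corridor_pos state pod changed_room initial_steps ≠ find_path_from_room_alt room_type room_name target_corridor_pos state pod changed_room initial_steps

-- ===== LEMMAS AND PROOFS =====

lemma walkAGo_false_iff (cor : List (Option String)) (t : Int) :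
    ∀ (fuel : Nat) (pos steps : Int), fuel = (t - pos).natAbs →
      ((walkAGo cor t fuel pos steps).1 = false ↔
        ∃ q : Int, ((pos < q ∧ q ≤ t) ∨ (t ≤ q ∧ q < pos)) ∧ truthyAt cor q = true) := by
  intro fuel
  induction fuel with
  | zero =>
    intro pos steps h
    have hpt : pos = t := by omega
    subst hpt
    show (true = false) ↔ _
    simp only [Bool.true_eq_false, false_iff]
    rintro ⟨q, h1, -⟩
    omega
  | succ n ih =>
    intro pos steps h
    simp only [walkAGo]
    by_cases hb : truthyAt cor (pos + (if t > pos then 1 else -1)) = true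
    · rw [if_pos hb]
      refine iff_of_true rfl ⟨_, ?_, hb⟩
      split_ifs <;> omega
    · rw [if_neg hb]
      rw [ih (pos + (if t > pos then 1 else -1)) (steps + 1) (by split_ifs <;> omega)]
      constructor
      · rintro ⟨q, h1, h3⟩
        exact ⟨q, by split_ifs at h1 <;> omega, h3⟩
      · rintro ⟨q, h1, h3⟩
        have hq : ¬ (q = pos + (if t > pos then 1 else -1)) := fun he => hb (he ▸ h3)
        exact ⟨q, by split_ifs at hq <;> omega, h3⟩

lemma walkA_fst_eq_false_iff (cor : List (Option String)) (t pos steps : Int) :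
    (walkA cor t pos steps).1 = false ↔
      ∃ q : Int, ((pos < q ∧ q ≤ t) ∨ (t ≤ q ∧ q < pos)) ∧ truthyAt cor q = true :=
  walkAGo_false_iff cor t ((t - pos).natAbs) pos steps rfl

lemma walkAGo_snd_of_fst (cor : List (Option String)) (t : Int) :
    ∀ (fuel : Nat) (pos steps : Int),
      (walkAGo cor t fuel pos steps).1 = true →
        (walkAGo cor t fuel pos steps).2 = steps + (fuel : Int) := by
  intro fuel
  induction fuel with
  | zero =>
    intro pos steps _
    show steps = steps + ((0 : Nat) : Int)
    omega
  | succ n ih =>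
    intro pos steps h
    simp only [walkAGo] at h ⊢
    by_cases hb : truthyAt cor (pos + (if t > pos then 1 else -1)) = true
    · rw [if_pos hb] at h
      exact absurd h (by simp)
    · rw [if_neg hb] at h ⊢
      rw [ih _ _ h]
      omega

lemma walkA_snd_of_fst (cor : List (Option String)) (t pos steps : Int) :
    (walkA cor t pos steps).1 = true →
      (walkA cor t pos steps).2 = steps + ((t - pos).natAbs : Int) :=
  walkAGo_snd_of_fst cor t ((t - pos).natAbs) pos steps

lemma truthyAt_of_ge_len (cor : List (Option String)) (q : Int) (h : (cor.length : Int) ≤ q) :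
    truthyAt cor q = false := by
  unfold truthyAt
  have : PySem.List.pyGet? cor q = none := by
    simp only [PySem.List.pyGet?, PySem.List.pyIdx?]
    rw [if_pos (by omega : (0:Int) ≤ q), if_neg (by omega : ¬ q < (cor.length : Int))]
    rfl
  rw [this]

lemma truthyAt_of_lt_neg_len (cor : List (Option String)) (q : Int) (h : q < -(cor.length : Int)) :
    truthyAt cor q = false := by
  unfold truthyAt
  have : PySem.List.pyGet? cor q = none := by
    simp only [PySem.List.pyGet?, PySem.List.pyIdx?]
    rw [if_neg (by omega : ¬ (0:Int) ≤ q), if_neg (by omega : ¬ -(cor.length : Int) ≤ q)]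
    rfl
  rw [this]

lemma truthyAt_natCast (cor : List (Option String)) (k : Nat) (hk : k < cor.length) :
    truthyAt cor (k : Int) = (match cor[k] with | some s => decide (s ≠ "") | none => false) := by
  unfold truthyAt
  rw [PySem.List.pyGet?_natCast]
  rw [List.getElem?_eq_getElem hk]
  cases cor[k] <;> rfl

lemma mem_occB_iff (cor : List (Option String)) (i : Int) :
    i ∈ occB cor ↔ 0 ≤ i ∧ i < (cor.length : Int) ∧ truthyAt cor i = true := by
  simp only [occB, List.mem_map, List.mem_filter, PySem.List.mem_enumerate_iff]
  constructor
  · rintro ⟨p, ⟨⟨k, hk, rfl⟩, hP⟩, rfl⟩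
    refine ⟨by omega, by simpa using hk, ?_⟩
    have := truthyAt_natCast cor k hk
    simp only [zero_add] at *
    rw [this]
    simpa using hP
  · rintro ⟨h0, hL, ht⟩
    have hk : i.toNat < cor.length := by omega
    refine ⟨((i.toNat : Nat), cor[i.toNat]), ⟨⟨i.toNat, hk, by simp [Int.toNat_of_nonneg h0]⟩, ?_⟩,
      by simp [Int.toNat_of_nonneg h0]⟩
    have := truthyAt_natCast cor i.toNat hk
    have hi : ((i.toNat : Nat) : Int) = i := by omega
    rw [hi] at this
    rw [ht] at this
    simpa using this.symm

lemma maxD_lt_iff (xs : List Int) (d q : Int) (hd : ∀ i ∈ xs, d ≤ i) :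
    (PySem.List.max? xs (fun i => i)).getD d < q ↔ d < q ∧ ∀ i ∈ xs, i < q := by
  cases hx : PySem.List.max? xs (fun i => i) with
  | none =>
    have : xs = [] := (PySem.List.max?_eq_none_iff _ _).mp hx
    subst this
    simp
  | some m =>
    have hm : m ∈ xs := PySem.List.max?_mem hx
    have hmax := PySem.List.max?_isMax hx
    simp only [Option.getD_some]
    constructor
    · intro h
      exact ⟨lt_of_le_of_lt (hd m hm) h, fun i hi => lt_of_le_of_lt (hmax i hi) h⟩
    · rintro ⟨-, h2⟩
      exact h2 m hm

lemma lt_minD_iff (xs : List Int) (d q : Int) (hd : ∀ i ∈ xs, i ≤ d) :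
    q < (PySem.List.min? xs (fun i => i)).getD d ↔ q < d ∧ ∀ i ∈ xs, q < i := by
  cases hx : PySem.List.min? xs (fun i => i) with
  | none =>
    have : xs = [] := (PySem.List.min?_eq_none_iff _ _).mp hx
    subst this
    simp
  | some m =>
    have hm : m ∈ xs := PySem.List.min?_mem hx
    have hmin := PySem.List.min?_isMin hx
    simp only [Option.getD_some]
    constructor
    · intro h
      exact ⟨lt_of_lt_of_le h (hd m hm), fun i hi => lt_of_lt_of_le h (hmin i hi)⟩
    · rintro ⟨-, h2⟩
      exact h2 m hm

lemma leftB_lt_iff (cor : List (Option String)) (s q : Int) :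
    leftB cor s < q ↔ -1 < q ∧ ∀ i ∈ occB cor, i ≤ s → i < q := by
  unfold leftB
  rw [maxD_lt_iff]
  · simp [List.mem_filter]
  · intro i hi
    have := (mem_occB_iff cor i).mp (List.mem_filter.mp hi).1
    omega

lemma lt_rightB_iff (cor : List (Option String)) (s q : Int) :
    q < rightB cor s ↔ q < (cor.length : Int) ∧ ∀ i ∈ occB cor, s ≤ i → q < i := by
  unfold rightB
  rw [lt_minD_iff]
  · simp [List.mem_filter]
  · intro i hi
    have := (mem_occB_iff cor i).mp (List.mem_filter.mp hi).1
    omega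

lemma ports_agree (room_type room_name : String) (t : Int)
    (state : List (List (Option String))) (pod : String)
    (cr : List (Option String)) (ini : Int)
    (hpre : Pre_find_path_from_room room_type room_name t state pod cr ini)
    (hnd : ¬ D_find_path_from_room room_type room_name t state pod cr ini) :
    find_path_from_room room_type room_name t state pod cr ini
      = find_path_from_room_alt room_type room_name t state pod cr ini := by
  obtain ⟨hrt, hne, hsL, hclear⟩ := hpre
  cases state with
  | nil => exact absurd rfl hne
  | cons c rest =>
  simp only [List.headD_cons] at hsL hclear
  unfold D_find_path_from_room at hnd
  simp only [List.headD_cons] at hnd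
  have hs0 : 0 ≤ roomCorPos room_type := by rcases hrt with rfl | rfl | rfl | rfl <;> decide
  have hget : (PySem.List.pyGet? (c :: rest) 0).getD [] = c := by
    simp [PySem.List.pyGet?, PySem.List.pyIdx?]
  unfold find_path_from_room find_path_from_room_alt
  simp only [hget]
  set s := roomCorPos room_type with hsdef
  by_cases hb1 : truthyAt c s = true
  · rw [if_pos hb1]
    have hsocc : s ∈ occB c := (mem_occB_iff c s).mpr ⟨hs0, hsL, hb1⟩
    have hnl : ¬ (leftB c s < s) := fun hlt =>
      absurd (((leftB_lt_iff c s s).mp hlt).2 s hsocc (le_refl s)) (lt_irrefl s)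
    rw [if_neg (fun hc => hnl hc.1)]
  · have hb1' : truthyAt c s = false := by simpa using hb1
    rw [if_neg hb1]
    by_cases hw : (walkA c t s ini).1 = true
    · -- walk clear: the whole inclusive segment between s and t is free
      have hseg : ∀ q : Int, min s t ≤ q → q ≤ max s t → truthyAt c q = false := by
        intro q h1 h2
        by_cases hqs : q = s
        · exact hqs ▸ hb1'
        · by_contra hq
          have hq' : truthyAt c q = true := by simpa using hq
          have : (walkA c t s ini).1 = false :=
            (walkA_fst_eq_false_iff c t s ini).mpr ⟨q, by omega, hq'⟩
          rw [this] at hw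
          exact absurd hw (by simp)
      have hnb : ¬ blockedBetween c s t = true := by
        intro hbb
        obtain ⟨p, hp, hpt⟩ := List.any_eq_true.mp hbb
        rw [PySem.List.mem_pyRange_one] at hp
        have := hseg p (by omega) (by omega)
        rw [this] at hpt
        exact absurd hpt (by simp)
      obtain ⟨htm, htL, hpod, hrn, hidx⟩ := hclear hnb
      have ht0 : 0 ≤ t := by
        by_contra h
        exact hnd ⟨by omega, hnb⟩
      have hBpass : leftB c s < s ∧ s < rightB c s ∧ leftB c s < t ∧ t < rightB c s := by
        have hocc : ∀ i ∈ occB c, truthyAt c i = true ∧ 0 ≤ i ∧ i < (c.length : Int) := by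
          intro i hi
          have := (mem_occB_iff c i).mp hi
          exact ⟨this.2.2, this.1, this.2.1⟩
        refine ⟨(leftB_lt_iff c s s).mpr ⟨by omega, ?_⟩, (lt_rightB_iff c s s).mpr ⟨hsL, ?_⟩,
                (leftB_lt_iff c s t).mpr ⟨by omega, ?_⟩, (lt_rightB_iff c s t).mpr ⟨htL, ?_⟩⟩ <;>
        · intro i hi hle
          obtain ⟨hit, hi0, hiL⟩ := hocc i hi
          by_contra hcon
          have := hseg i (by omega) (by omega)
          rw [this] at hit
          exact absurd hit (by simp)
      rw [if_pos hw, if_pos hBpass]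
      have hw2 := walkA_snd_of_fst c t s ini hw
      rw [hw2]
      unfold copyState
      rfl
    · -- walk blocked
      have hwf : (walkA c t s ini).1 = false := by simpa using hw
      rw [if_neg hw]
      obtain ⟨q, hq1, hqt⟩ := (walkA_fst_eq_false_iff c t s ini).mp hwf
      by_cases ht0 : t < 0
      · have : ¬ (leftB c s < t) := fun hlt => by
          have := ((leftB_lt_iff c s t).mp hlt).1
          omega
        rw [if_neg (fun hc => this hc.2.2.1)]
      · have hqL : q < (c.length : Int) := by
          by_contra h
          rw [truthyAt_of_ge_len c q (by omega)] at hqt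
          exact absurd hqt (by simp)
        have hqocc : q ∈ occB c := (mem_occB_iff c q).mpr ⟨by omega, hqL, hqt⟩
        by_cases hqs : q ≤ s
        · -- blocker at or below s: t ≤ q < s
          have : ¬ (leftB c s < t) := fun hlt => by
            have := ((leftB_lt_iff c s t).mp hlt).2 q hqocc hqs
            omega
          rw [if_neg (fun hc => this hc.2.2.1)]
        · -- blocker above s: s < q ≤ t
          have : ¬ (t < rightB c s) := fun hlt => by
            have := ((lt_rightB_iff c s t).mp hlt).2 q hqocc (by omega)
            omega
          rw [if_neg (fun hc => this hc.2.2.2)]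

-- ===== VERDICT (by name: the statements are the Claim_ definitions above) =====
theorem find_path_from_room_spec : Claim_unchanged_find_path_from_room := by
  intro room_type room_name t state pod cr ini _ hpre hnd
  exact ports_agree room_type room_name t state pod cr ini hpre hnd

theorem find_path_from_room_changed : Claim_changed_find_path_from_room := by
  unfold Claim_changed_find_path_from_room
  refine ⟨by decide, by decide, by decide, by decide, by decide, by decide⟩

theorem find_path_from_room_tight : Claim_exact_find_path_from_room := by
  unfold Claim_exact_find_path_from_room
  intro room_type room_name t state pod cr ini _ hpre hd
  obtain ⟨hrt, hne, hsL, -⟩ := hpre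
  obtain ⟨htneg, hnb⟩ := hd
  cases state with
  | nil => exact absurd rfl hne
  | cons c rest =>
  simp only [List.headD_cons] at hsL hnb
  have hs0 : 0 ≤ roomCorPos room_type := by rcases hrt with rfl | rfl | rfl | rfl <;> decide
  set s := roomCorPos room_type with hsdef
  have hnotruthy : ∀ q : Int, min s t ≤ q → q ≤ max s t → truthyAt c q = false := by
    intro q h1 h2
    by_cases hqlow : q < -(c.length : Int)
    · exact truthyAt_of_lt_neg_len c q hqlow
    · by_cases hqhigh : (c.length : Int) ≤ q
      · exact truthyAt_of_ge_len c q hqhigh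
      · by_contra hq
        exact hnb (List.any_eq_true.mpr ⟨q, PySem.List.mem_pyRange_one.mpr (by omega), by simpa using hq⟩)
  have hb1 : truthyAt c s = false := hnotruthy s (by omega) (by omega)
  have hw : (walkA c t s ini).1 = true := by
    by_contra h
    obtain ⟨q, hq1, hqt⟩ := (walkA_fst_eq_false_iff c t s ini).mp (by simpa using h)
    rw [hnotruthy q (by omega) (by omega)] at hqt
    exact absurd hqt (by simp)
  have hget : (PySem.List.pyGet? (c :: rest) 0).getD [] = c := by
    simp [PySem.List.pyGet?, PySem.List.pyIdx?]
  have hA : (find_path_from_room room_type room_name t (c :: rest) pod cr ini).1 = true := by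
    unfold find_path_from_room
    simp only [hget, ← hsdef]
    rw [if_neg (by simp [hb1]), if_pos hw]
  have hB : (find_path_from_room_alt room_type room_name t (c :: rest) pod cr ini).1 = false := by
    unfold find_path_from_room_alt
    simp only [hget, ← hsdef]
    have : ¬ (leftB c s < t) := fun hlt => by
      have := ((leftB_lt_iff c s t).mp hlt).1
      omega
    rw [if_neg (fun hc => this hc.2.2.1)]
  intro heq
  rw [heq, hB] at hA
  exact absurd hA (by simp)
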